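/- GENERATED by mk_final_copies.py from the proof of the farm's unit `start_decoder.C11b` (farm:start_decoder.C11b.1: Proof.lean) as the
   re-elaboration sweep compiled it — do not edit. -/
import Asan.CheckWalk
import Vorbis.Spec.Reader
import Vorbis.Spec.StartDecoderC4
import Vorbis.Spec.Units.start_decoder_C11b
import Vorbis.Spec.Worked.start_decoder_C11b_Lemmas

open X86 X86.User Asan Vorbis Vorbis.Spec Vorbis.Spec.StartDecoder

set_option maxRecDepth 4000
set_option maxHeartbeats 4000000

namespace Vorbis.Spec.start_decoder_C11b

/-- **Segment C11b of `start_decoder`** (0x114be4 … 0x114c21; stb_vorbis_fixed.c:3879–3881) from its three legs (Lemmas.lean), one per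
returned callee: `legA` (`cut152` → `cut153`, float32_unpack), `legB` (`cut153` → `cut154`, the store `c->delta_value`,
`get_bits(f, 4)`), `legC` (`cut154` → `cut155`, the store `c->value_bits`, `get_bits(f, 1)`), glued by `ReachVia.trans`. -/
theorem segC11b_walk {Lay : Layout} (hLay : Lay.hi = 0x1000000) {μ : Microarch} (hμ : UserX.MicroOK μ) {u₀ : State}
    (hcode : HasCodeNat Lay u₀ Vorbis.L.start_decoder.entry Vorbis.Code.code_start_decoder.nat Vorbis.L.start_decoder.size)
    (hgb : ∀ (others : List Obj) (frames : List (Nat × FrameLayout)) (Blk : Block → Prop) (len : Nat), Calls Lay μ Vorbis.WayInv (Vorbis.conv u₀) Vorbis.L.get_bits.entry (Vorbis.Spec.get_bits.spec others frames Blk len))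
    (hfu : ∀ (others : List Obj) (frames : List (Nat × FrameLayout)), Calls Lay μ Vorbis.WayInv (Vorbis.conv u₀) Vorbis.L.float32_unpack.entry (Vorbis.Spec.float32_unpack.spec others frames))
    (hst4 : Asan.SmallCheck Lay μ Vorbis.WayInv (Vorbis.CodeOK u₀) [.rax, .rcx, .rdx] 4 Vorbis.L.__asan_store4_noabort.entry)
    (hst1 : Asan.SmallCheck Lay μ Vorbis.WayInv (Vorbis.CodeOK u₀) [.rax, .rdx] 1 Vorbis.L.__asan_store1_noabort.entry)
    {g : Ghost} {i : Nat} {A2 A3 Ai : Arena} {A : Arena × List Obj} {v : State}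
    (hat : In11P u₀ g i A2 A3 Ai A Vorbis.L.start_decoder.cut152 v) (hr15 : v.reg .r15 = addr g.f) :
    ReachVia Lay μ WayInv v (fun w => At11B u₀ g i w) := by
  -- 0x114be4 → 0x114beb: float32_unpack (line 3879)
  refine (legA hLay hμ hcode hfu hat hr15).trans ?_
  intro w1 hw1
  obtain ⟨hat1, hr15_1⟩ := hw1
  -- 0x114beb → 0x114c09: `c->delta_value`, get_bits(f, 4) (lines 3879, 3880)
  refine (legB hLay hμ hcode hgb hst4 hat1 hr15_1).trans ?_
  intro w2 hw2
  obtain ⟨hat2, hr15_2, hrax2⟩ := hw2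
  -- 0x114c09 → 0x114c26: `c->value_bits`, get_bits(f, 1) (lines 3880, 3881)
  refine (legC hLay hμ hcode hgb hst1 hat2 hr15_2 hrax2).trans ?_
  intro w3 hw3
  exact ReachVia.done ⟨A, A2, A3, Ai, hw3.1, hw3.2⟩

end Vorbis.Spec.start_decoder_C11b

/-- The unit `start_decoder.C11b`: `segC11b_walk` at every entry state. -/
theorem Vorbis.Spec.Worked.start_decoder_C11b_ok : Vorbis.Spec.start_decoder_C11b.Statement := by
  intro Lay hLay μ hμ u₀ hcode hgb hfu hst4 hst1 g i v hat
  obtain ⟨A, A2, A3, Ai, h, hr15⟩ := hat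
  exact Vorbis.Spec.start_decoder_C11b.segC11b_walk hLay hμ hcode hgb hfu hst4 hst1 h hr15
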